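-- pv_equiv track=rewrite | github.com/dariakryvosheieva/syntax-units | local_datasets/lexical_violation_from_blimp.py | has_det_or_prep
-- ===== SOURCE A (Python) =====
-- DETERMINERS = {
--     "a",
--     "an",
--     "the",
--     "this",
--     "that",
--     "these",
--     "those",
--     "my",
--     "your",
--     "his",
--     "her",
--     "its",
--     "our",
--     "their",
--     "some",
--     "any",
--     "each",
--     "every",
--     "either",
--     "neither",
--     "no",
--     "all",
--     "both",
--     "many",
--     "few",
--     "several",
--     "much",
--     "little",
--     "another",
--     "such",
--     "what",
--     "whose",
--     "one",
--     "two",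
--     "three",
--     "four",
--     "five",
--     "six",
--     "seven",
--     "eight",
--     "nine",
--     "ten",
-- }
--
-- BOUNDARY_UPOS = {"VERB", "AUX", "ADP", "SCONJ", "CCONJ", "PUNCT", "INTJ", "SYM"}
--
-- def has_det_or_prep(i, tokens, upos):
--     k = i - 1
--     while k >= 0:
--         if upos[k] in BOUNDARY_UPOS or tokens[k] in {",", ";", ":"}:
--             break
--         if upos[k] == "DET" or tokens[k].lower() in DETERMINERS:
--             return True
--         if upos[k] == "ADP":
--             return True
--         k -= 1
--     return False
-- ===== SOURCE B (Python) =====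
-- DETERMINERS = {
--     "a", "an", "the", "this", "that", "these", "those", "my", "your", "his",
--     "her", "its", "our", "their", "some", "any", "each", "every", "either",
--     "neither", "no", "all", "both", "many", "few", "several", "much",
--     "little", "another", "such", "what", "whose", "one", "two", "three",
--     "four", "five", "six", "seven", "eight", "nine", "ten",
-- }
--
-- BOUNDARY_UPOS = {"VERB", "AUX", "ADP", "SCONJ", "CCONJ", "PUNCT", "INTJ", "SYM"}
--
-- SEGMENT_PUNCT = {",", ";", ":"}
--
--
-- def has_det_or_prep(i, tokens, upos):
--     # Phase 1: find j, the nearest boundary index strictly before i (or -1).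
--     j = i - 1
--     while j >= 0 and upos[j] not in BOUNDARY_UPOS and tokens[j] not in SEGMENT_PUNCT:
--         j -= 1
--     # Phase 2: any determiner inside the open segment (j, i).
--     return any(upos[k] == "DET" or tokens[k].lower() in DETERMINERS
--                for k in range(j + 1, i))
-- ===== Notes on version B (the rewrite author's own statement) =====
-- stated objective: alternative
-- what changed: A's single fused backward scan (break on boundary / early return on determiner) is split into two phases: first find the nearest preceding boundary index j, then check the open segment tokens[j+1:i] for a determiner with any().
-- outside the precondition, e.g. on has_det_or_prep(1, [], ['VERB']): A returns False, B returns False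
import Mathlib
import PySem

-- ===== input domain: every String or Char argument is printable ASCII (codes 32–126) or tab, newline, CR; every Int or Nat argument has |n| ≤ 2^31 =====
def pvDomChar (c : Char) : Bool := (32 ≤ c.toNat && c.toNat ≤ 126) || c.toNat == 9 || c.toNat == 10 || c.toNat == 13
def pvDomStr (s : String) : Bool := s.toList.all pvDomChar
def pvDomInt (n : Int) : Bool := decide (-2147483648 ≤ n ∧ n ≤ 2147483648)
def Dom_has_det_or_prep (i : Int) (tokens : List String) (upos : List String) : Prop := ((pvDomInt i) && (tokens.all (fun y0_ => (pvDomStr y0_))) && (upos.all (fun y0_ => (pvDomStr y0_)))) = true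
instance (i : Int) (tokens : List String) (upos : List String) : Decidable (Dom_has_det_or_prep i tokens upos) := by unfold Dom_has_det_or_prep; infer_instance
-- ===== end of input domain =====

-- B replaces A's single fused backward scan by two phases (find the nearest preceding
-- boundary, then check the open segment for a determiner); objective: alternative, same cost.

-- shared module-level constants of the Python file
def pvDeterminers : List String :=
  ["a", "an", "the", "this", "that", "these", "those", "my", "your", "his",
   "her", "its", "our", "their", "some", "any", "each", "every", "either",
   "neither", "no", "all", "both", "many", "few", "several", "much",
   "little", "another", "such", "what", "whose", "one", "two", "three",
   "four", "five", "six", "seven", "eight", "nine", "ten"]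

def pvBoundaryUpos : List String :=
  ["VERB", "AUX", "ADP", "SCONJ", "CCONJ", "PUNCT", "INTJ", "SYM"]

-- ===== PORT A =====
-- A's while-loop over k = i-1, i-2, …, 0; fuel n means current index k = n-1.
-- On an out-of-range index Python raises IndexError (excluded by Pre_); the port returns false there.
def pvLoopA (tokens upos : List String) : Nat → Bool
  | 0 => false
  | Nat.succ k =>
    match upos[k]?, tokens[k]? with
    | some u, some t =>
      if u ∈ pvBoundaryUpos ∨ t ∈ ([",", ";", ":"] : List String) then false
      else if u = "DET" ∨ PySem.Str.lower t ∈ pvDeterminers then true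
      else if u = "ADP" then true
      else pvLoopA tokens upos k
    | _, _ => false

def has_det_or_prep (i : Int) (tokens : List String) (upos : List String) : Bool :=
  pvLoopA tokens upos i.toNat

-- ===== PORT B =====
-- Phase 1 of Source B: the while-loop computing j+1, the start of the open segment;
-- fuel n means current index j = n-1 (j = -1 yields start 0, which gives the same empty range).
def pvFindStart (tokens upos : List String) : Nat → Nat
  | 0 => 0
  | Nat.succ j =>
    match upos[j]?, tokens[j]? with
    | some u, some t =>
      if u ∈ pvBoundaryUpos ∨ t ∈ ([",", ";", ":"] : List String) then j + 1
      else pvFindStart tokens upos j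
    | _, _ => j + 1

-- the generator expression's body: determiner test at index k
def pvDet (tokens upos : List String) (k : Int) : Bool :=
  match PySem.List.pyGet? upos k, PySem.List.pyGet? tokens k with
  | some u, some t => decide (u = "DET" ∨ PySem.Str.lower t ∈ pvDeterminers)
  | _, _ => false

-- Phase 2 of Source B: any(...) over range(j+1, i)
def has_det_or_prep_alt (i : Int) (tokens : List String) (upos : List String) : Bool :=
  (PySem.List.pyRange (pvFindStart tokens upos i.toNat : Int) i 1).any (pvDet tokens upos)

-- ===== PRECONDITION & SPEC =====
-- Pre_ excludes i larger than either list's length: there the backward scan can index past a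
-- list end and A raises IndexError; on a few such inputs a boundary at the front stops A before
-- the bad access and A returns False — B returns the same value there (see the cite).
def Pre_has_det_or_prep (i : Int) (tokens : List String) (upos : List String) : Prop :=
  i ≤ (tokens.length : Int) ∧ i ≤ (upos.length : Int)
instance (i : Int) (tokens : List String) (upos : List String) : Decidable (Pre_has_det_or_prep i tokens upos) := by unfold Pre_has_det_or_prep; infer_instance

def pvWitness_has_det_or_prep : Int × List String × List String :=
  (2, ["the", "cat"], ["DET", "NOUN"])

def Spec_has_det_or_prep (i : Int) (tokens : List String) (upos : List String) (out : Bool) : Prop := out = has_det_or_prep_alt i tokens upos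
instance (i : Int) (tokens : List String) (upos : List String) (out : Bool) : Decidable (Spec_has_det_or_prep i tokens upos out) := by unfold Spec_has_det_or_prep; infer_instance

-- ===== CLAIM (what is proved, stated in full; the proofs are below) =====
def Claim_equal_has_det_or_prep : Prop := ∀ (i : Int) (tokens : List String) (upos : List String), Dom_has_det_or_prep i tokens upos → Pre_has_det_or_prep i tokens upos → Spec_has_det_or_prep i tokens upos (has_det_or_prep i tokens upos)

-- ===== LEMMAS AND PROOFS =====

theorem pvFindStart_le (tokens upos : List String) (n : Nat) :
    pvFindStart tokens upos n ≤ n := by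
  induction n with
  | zero => simp [pvFindStart]
  | succ k ih =>
    unfold pvFindStart
    cases upos[k]? <;> cases tokens[k]? <;> simp
    split_ifs <;> omega

theorem pvDet_natCast (tokens upos : List String) (k : Nat) :
    pvDet tokens upos (k : Int) =
      match upos[k]?, tokens[k]? with
      | some u, some t => decide (u = "DET" ∨ PySem.Str.lower t ∈ pvDeterminers)
      | _, _ => false := by
  simp [pvDet, PySem.List.pyGet?_natCast]

theorem pvLoop_eq_seg (tokens upos : List String) (n : Nat)
    (ht : n ≤ tokens.length) (hu : n ≤ upos.length) :
    pvLoopA tokens upos n =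
      (PySem.List.pyRange (pvFindStart tokens upos n : Int) (n : Int) 1).any (pvDet tokens upos) := by
  induction n with
  | zero =>
    simp [pvLoopA, pvFindStart, PySem.List.pyRange_one_eq_nil]
  | succ k ih =>
    have hk_t : k < tokens.length := by omega
    have hk_u : k < upos.length := by omega
    have hus : upos[k]? = some (upos[k]) := List.getElem?_eq_getElem hk_u
    have hts : tokens[k]? = some (tokens[k]) := List.getElem?_eq_getElem hk_t
    have hfle : pvFindStart tokens upos k ≤ k := pvFindStart_le tokens upos k
    unfold pvLoopA pvFindStart
    rw [hus, hts]
    by_cases hb : upos[k] ∈ pvBoundaryUpos ∨ tokens[k] ∈ ([",", ";", ":"] : List String)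
    · simp only [hb, if_pos]
      rw [PySem.List.pyRange_one_eq_nil (by push_cast; omega)]
      simp
    · simp only [hb, if_neg, not_false_iff]
      have hsplit : PySem.List.pyRange (pvFindStart tokens upos k : Int) ((k : Int) + 1) 1
          = PySem.List.pyRange (pvFindStart tokens upos k : Int) (k : Int) 1 ++ [(k : Int)] := by
        exact PySem.List.pyRange_one_succ_right (by exact_mod_cast hfle)
      have hdet : pvDet tokens upos (k : Int)
          = decide (upos[k] = "DET" ∨ PySem.Str.lower tokens[k] ∈ pvDeterminers) := by
        rw [pvDet_natCast, hus, hts]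
      by_cases hd : upos[k] = "DET" ∨ PySem.Str.lower tokens[k] ∈ pvDeterminers
      · simp only [hd, if_pos]
        push_cast
        rw [hsplit]
        simp [List.any_append, hdet, hd]
      · simp only [hd, if_neg, not_false_iff]
        have hadp : ¬ upos[k] = "ADP" := by
          intro h
          exact hb (Or.inl (by rw [h]; simp [pvBoundaryUpos]))
        simp only [hadp, if_neg, not_false_iff]
        push_cast
        rw [hsplit]
        simp only [List.any_append, hdet, hd, List.any_cons,
          List.any_nil, Bool.or_false]
        rw [ih (by omega) (by omega)]
        simp

-- ===== VERDICT (by name: the statement is the Claim_ definition above) =====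
theorem has_det_or_prep_spec : Claim_equal_has_det_or_prep := by
  intro i tokens upos _hDom hPre
  unfold Spec_has_det_or_prep has_det_or_prep has_det_or_prep_alt
  rcases hPre with ⟨ht, hu⟩
  by_cases hi : i ≤ 0
  · have h0 : i.toNat = 0 := Int.toNat_of_nonpos hi
    rw [h0]
    simp [pvLoopA, pvFindStart, PySem.List.pyRange_one_eq_nil hi]
  · have hcast : ((i.toNat : Int)) = i := Int.toNat_of_nonneg (by omega)
    rw [pvLoop_eq_seg tokens upos i.toNat (by omega) (by omega), hcast]
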